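-- pv_equiv track=rewrite | github.com/Asal-Rah/Algorithms | practice.py | practice
-- ===== SOURCE A (Python) =====
-- def practice(a):
-- 	length = len(a)
-- 	assert(length >= 1)
-- 	if length > 2:
-- 		h = length // 2
-- 		sec1 = a[:h]
-- 		sec2 = a[h:]
-- 		results = []
-- 		results.append(sec1[:])
-- 		a = practice(sec1)
-- 		b = practice(sec2)
--
-- 		length_of_a = len(a)
-- 		length_of_b = len(b)
-- 		assert (length_of_a == length_of_b or length_of_a == length_of_b - 1)
-- 		for i in range(length_of_a):
-- 			results.append(a[i] + b[i])
-- 		if length_of_a == length_of_b - 1: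
-- 			results.append(a[0] + b[-1])
-- 		return results
--
-- 	else:
-- 		return [[a[0]]]
-- ===== SOURCE B (Python) =====
-- def practice(a):
--     # Iterative post-order divide-and-conquer over index segments with an
--     # explicit work stack and a value stack (no recursion, no sublist copies
--     # for the recursive calls).
--     assert len(a) >= 1
--     work = [(0, len(a), False)]
--     vals = []
--     while work:
--         lo, hi, combine = work.pop()
--         n = hi - lo
--         if combine:
--             mid = lo + n // 2
--             right = vals.pop()
--             left = vals.pop()
--             out = [a[lo:mid]]
--             out.extend(x + y for x, y in zip(left, right))
--             if len(left) == len(right) - 1: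
--                 out.append(left[0] + right[-1])
--             vals.append(out)
--         elif n <= 2:
--             vals.append([[a[lo]]])
--         else:
--             mid = lo + n // 2
--             work.append((lo, hi, True))
--             work.append((mid, hi, False))
--             work.append((lo, mid, False))
--     return vals[-1]
-- ===== Notes on version B (the rewrite author's own statement) =====
-- stated objective: alternative
-- what changed: Replaces A's recursion (which slices the list and recurses on copies) with an explicit iterative post-order worklist over index segments plus a value stack, combining each segment's result from its two children's already-computed results.
-- outside the precondition, e.g. on practice([]): A raises AssertionError, B raises AssertionError
import Mathlib
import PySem

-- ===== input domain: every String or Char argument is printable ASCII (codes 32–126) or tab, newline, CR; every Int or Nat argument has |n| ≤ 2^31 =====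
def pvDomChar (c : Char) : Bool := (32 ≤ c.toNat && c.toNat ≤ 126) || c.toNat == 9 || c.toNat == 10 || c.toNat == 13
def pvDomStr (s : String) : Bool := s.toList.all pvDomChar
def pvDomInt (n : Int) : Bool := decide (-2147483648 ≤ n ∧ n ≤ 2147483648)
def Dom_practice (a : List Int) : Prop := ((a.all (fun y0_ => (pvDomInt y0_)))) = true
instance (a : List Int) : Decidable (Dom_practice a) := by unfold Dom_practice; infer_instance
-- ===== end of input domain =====

-- B replaces A's recursion by an explicit iterative post-order worklist over index
-- segments with a value stack (alternative decomposition; same asymptotic cost).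

-- ===== PORT A =====
-- Literal port of A's recursion.  A's two `assert`s are provably never violated on
-- Pre_ (a ≠ []): the outer one is `length >= 1`, the inner length assert is the
-- content of lemma `practice_length` below; `ra[i]`/`rb[i]` are in range there, so
-- they are ported via `getD`.
def practice (a : List Int) : List (List Int) :=
  if _h : 2 < a.length then
    let sec1 := a.take (a.length / 2)
    let sec2 := a.drop (a.length / 2)
    let ra := practice sec1
    let rb := practice sec2
    let results := (List.range ra.length).foldl
      (fun acc i => acc ++ [ra.getD i [] ++ rb.getD i []]) [sec1]
    if (ra.length : Int) = (rb.length : Int) - 1 then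
      results ++ [ra.headD [] ++ rb.getLastD []]
    else results
  else [[a.headD 0]]
termination_by a.length
decreasing_by
  · simp; omega
  · simp; omega

-- ===== PORT B =====
-- Fuel upper bound for B's while loop: number of worklist pops needed for a
-- segment of size n (the fuel is only a totality guard; `cost` steps always suffice).
def cost (n : Nat) : Nat :=
  if h : n ≤ 2 then 1 else 2 + cost (n / 2) + cost (n - n / 2)
termination_by n
decreasing_by
  · omega
  · omega

-- B's while loop.  The Lean lists model Python's stacks with the HEAD as the top
-- (Python appends/pops at the end); `a[lo:mid]` is `(a.drop lo).take (mid - lo)`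
-- (0 ≤ lo ≤ mid ≤ len a on every reachable state), `a[lo]` is `a.getD lo 0`.
def runB (a : List Int) : Nat → List (Nat × Nat × Bool) → List (List (List Int)) → List (List (List Int))
  | 0, _, vals => vals
  | _ + 1, [], vals => vals
  | fuel + 1, (lo, hi, combine) :: work, vals =>
    let n := hi - lo
    if combine then
      match vals with
      | right :: left :: rest =>
        let mid := lo + n / 2
        let out := [(a.drop lo).take (mid - lo)]
          ++ List.zipWith (· ++ ·) left right
          ++ (if (left.length : Int) = (right.length : Int) - 1 then
                [left.headD [] ++ right.getLastD []] else [])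
        runB a fuel work (out :: rest)
      | _ => vals  -- `vals.pop()` on a short stack: unreachable from the initial state
    else if n ≤ 2 then
      runB a fuel work ([[a.getD lo 0]] :: vals)
    else
      let mid := lo + n / 2
      runB a fuel ((lo, mid, false) :: (mid, hi, false) :: (lo, hi, true) :: work) vals

def practice_alt (a : List Int) : List (List Int) :=
  (runB a (cost a.length) [(0, a.length, false)] []).headD []

-- ===== PRECONDITION & SPEC =====
-- A raises AssertionError on the empty list (assert length >= 1); excluded.
def Pre_practice (a : List Int) : Prop := a ≠ []
instance (a : List Int) : Decidable (Pre_practice a) := by unfold Pre_practice; infer_instance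
def pvWitness_practice : List Int := [1, 2, 3, 4, 5]

def Spec_practice (a : List Int) (out : List (List Int)) : Prop := out = practice_alt a
instance (a : List Int) (out : List (List Int)) : Decidable (Spec_practice a out) := by unfold Spec_practice; infer_instance

-- ===== CLAIM (what is proved, stated in full; the proofs are below) =====
def Claim_equal_practice : Prop := ∀ (a : List Int), Dom_practice a → Pre_practice a → Spec_practice a (practice a)

-- ===== LEMMAS AND PROOFS =====

-- Length of A's result depends only on the input length, via this recursion.
def plen (n : Nat) : Nat :=
  if h : n ≤ 2 then 1 else 1 + plen (n - n / 2)
termination_by n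
decreasing_by omega

theorem plen_le_two {n : Nat} (h : n ≤ 2) : plen n = 1 := by
  rw [plen]; simp [h]

theorem plen_gt {n : Nat} (h : 2 < n) : plen n = 1 + plen (n - n / 2) := by
  rw [plen]; simp [Nat.not_le.mpr h]

-- Within a doubling band, plen grows by at most 1 (the inner assert of A).
theorem plen_band : ∀ n m : Nat, 1 ≤ m → m ≤ n → n ≤ 2 * m →
    plen m = plen n ∨ plen m + 1 = plen n := by
  intro n
  induction n using Nat.strong_induction_on with
  | _ n ih =>
    intro m h1 hmn hn2
    by_cases hn : n ≤ 2
    · rw [plen_le_two hn, plen_le_two (le_trans hmn hn)]; left; rfl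
    · by_cases hm : m ≤ 2
      · have hrec : n - n / 2 = 2 := by omega
        rw [plen_le_two hm, plen_gt (show 2 < n by omega), hrec, plen_le_two (by omega)]
        right; rfl
      · rw [plen_gt (show 2 < m by omega), plen_gt (show 2 < n by omega)]
        have := ih (n - n / 2) (by omega) (m - m / 2) (by omega) (by omega) (by omega)
        omega

theorem cost_le_two {n : Nat} (h : n ≤ 2) : cost n = 1 := by
  rw [cost]; simp [h]

theorem cost_gt {n : Nat} (h : 2 < n) : cost n = 2 + cost (n / 2) + cost (n - n / 2) := by
  rw [cost]; simp [show ¬ n ≤ 2 by omega]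

theorem practice_le_two {a : List Int} (h : a.length ≤ 2) : practice a = [[a.headD 0]] := by
  rw [practice]; simp [show ¬ 2 < a.length by omega]

theorem practice_gt {a : List Int} (h : 2 < a.length) :
    practice a =
      (if ((practice (a.take (a.length / 2))).length : Int)
          = ((practice (a.drop (a.length / 2))).length : Int) - 1 then
        ([a.take (a.length / 2)] ++
          (List.range (practice (a.take (a.length / 2))).length).map
            (fun i => (practice (a.take (a.length / 2))).getD i []
              ++ (practice (a.drop (a.length / 2))).getD i []))
          ++ [(practice (a.take (a.length / 2))).headD []
              ++ (practice (a.drop (a.length / 2))).getLastD []]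
      else
        [a.take (a.length / 2)] ++
          (List.range (practice (a.take (a.length / 2))).length).map
            (fun i => (practice (a.take (a.length / 2))).getD i []
              ++ (practice (a.drop (a.length / 2))).getD i [])) := by
  rw [practice, dif_pos h]
  simp only [PySem.List.foldl_append_singleton_eq_map]

theorem practice_length_aux : ∀ (n : Nat) (a : List Int), a.length = n →
    (practice a).length = plen n := by
  intro n
  induction n using Nat.strong_induction_on with
  | _ n ih =>
    intro a hn
    by_cases h2 : 2 < n
    · have hta : (a.take (a.length / 2)).length = n / 2 := by simp; omega
      have hda : (a.drop (a.length / 2)).length = n - n / 2 := by simp; omega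
      have hra := ih (n / 2) (by omega) _ hta
      have hrb := ih (n - n / 2) (by omega) _ hda
      have hband := plen_band (n - n / 2) (n / 2) (by omega) (by omega) (by omega)
      rw [practice_gt (by omega), plen_gt h2]
      split_ifs with hc
      · rw [hra, hrb] at hc
        simp [hra]
        omega
      · rw [hra, hrb] at hc
        simp [hra]
        omega
    · rw [practice_le_two (by omega), plen_le_two (by omega)]
      rfl

theorem practice_length (a : List Int) : (practice a).length = plen a.length :=
  practice_length_aux a.length a rfl

theorem headD_drop_take : ∀ (a : List Int) (lo k : Nat), 1 ≤ k →
    ((a.drop lo).take k).headD 0 = a.getD lo 0 := by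
  intro a
  induction a with
  | nil => intro lo k _; simp
  | cons x xs ih =>
    intro lo k hk
    cases lo with
    | zero => cases k with
      | zero => omega
      | succ k => simp
    | succ lo => simpa using ih lo k hk

-- The index loop of A is elementwise zip once the left length is ≤ the right one.
theorem map_range_getD_eq_zipWith : ∀ (la lb : List (List Int)), la.length ≤ lb.length →
    (List.range la.length).map (fun i => la.getD i [] ++ lb.getD i []) =
      List.zipWith (· ++ ·) la lb := by
  intro la
  induction la with
  | nil => intro lb _; simp
  | cons x xs ih =>
    intro lb hle
    cases lb with
    | nil => simp at hle
    | cons y ys =>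
      simp only [List.length_cons, List.range_succ_eq_map, List.map_cons, List.map_map,
        List.zipWith_cons_cons]
      refine congrArg₂ _ rfl ?_
      have := ih ys (by simpa using hle)
      simpa [Function.comp] using this

-- Main machine lemma: popping a fresh segment computes A's recursive result for it.
-- Main machine lemma: popping a fresh segment computes A's recursive result for it.
theorem runB_go (a : List Int) : ∀ n lo hi, hi - lo = n → 1 ≤ n → hi ≤ a.length →
    ∀ (work : List (Nat × Nat × Bool)) (vals : List (List (List Int))) (fuel : Nat),
      runB a (cost n + fuel) ((lo, hi, false) :: work) vals
        = runB a fuel work (practice ((a.drop lo).take n) :: vals) := by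
  intro n
  induction n using Nat.strong_induction_on with
  | _ n ih =>
    intro lo hi hn h1 hhi work vals fuel
    by_cases h2 : 2 < n
    · -- split step, two recursive segments, then the combine step
      have hlolt : lo < hi := by omega
      have hmid : lo + (hi - lo) / 2 - lo = n / 2 := by omega
      have hcost : cost n + fuel = (cost (n / 2) + (cost (n - n / 2) + (1 + fuel))) + 1 := by
        rw [cost_gt h2]; omega
      rw [hcost]
      simp only [runB, hn, if_neg (Bool.false_ne_true), show ¬ n ≤ 2 by omega, if_false]
      rw [ih (n / 2) (by omega) lo (lo + n / 2) (by omega) (by omega) (by omega)]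
      rw [ih (n - n / 2) (by omega) (lo + n / 2) hi (by omega) (by omega) hhi]
      rw [show 1 + fuel = fuel + 1 from Nat.add_comm 1 fuel]
      simp only [runB, hn, if_true]
      rw [show lo + n / 2 - lo = n / 2 by omega]
      refine congrArg (runB a fuel work) (congrArg (· :: vals) ?_)
      have hsub : (List.take n (List.drop lo a)).length = n := by simp; omega
      rw [practice_gt (a := List.take n (List.drop lo a)) (by rw [hsub]; exact h2), hsub]
      have heq1 : List.take (n / 2) (List.take n (List.drop lo a))
          = List.take (n / 2) (List.drop lo a) := by
        rw [List.take_take]; congr 1; omega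
      have heq2 : List.drop (n / 2) (List.take n (List.drop lo a))
          = List.take (n - n / 2) (List.drop (lo + n / 2) a) := by
        rw [List.drop_take, List.drop_drop]
      rw [heq1, heq2]
      have hlen : (practice (List.take (n / 2) (List.drop lo a))).length
          ≤ (practice (List.take (n - n / 2) (List.drop (lo + n / 2) a))).length := by
        rw [practice_length, practice_length]
        have hband := plen_band (n - n / 2) (n / 2) (by omega) (by omega) (by omega)
        have hl1 : (List.take (n / 2) (List.drop lo a)).length = n / 2 := by simp; omega
        have hl2 : (List.take (n - n / 2) (List.drop (lo + n / 2) a)).length = n - n / 2 := by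
          simp; omega
        rw [hl1, hl2]; omega
      rw [map_range_getD_eq_zipWith _ _ hlen]
      split_ifs with hc
      · simp
      · simp
    · -- leaf segment
      have hcost : cost n + fuel = fuel + 1 := by rw [cost_le_two (by omega)]; omega
      rw [hcost]
      simp only [runB, hn, if_neg (Bool.false_ne_true), if_pos (show n ≤ 2 by omega)]
      rw [practice_le_two]
      · rw [headD_drop_take a lo n h1]
      · simp; omega

-- ===== VERDICT (by name: the statement is the Claim_ definition above) =====
theorem practice_spec : Claim_equal_practice := by
  intro a _ hpre
  unfold Spec_practice practice_alt
  have hlen : 1 ≤ a.length := by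
    cases a with
    | nil => exact absurd rfl hpre
    | cons x xs => simp
  have h := runB_go a a.length 0 a.length (by omega) hlen (le_refl _) [] [] 0
  rw [Nat.add_zero] at h
  rw [h]
  simp [runB]
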